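-- pv_equiv track=rewrite | github.com/suxinhang/SpeechJudge | infer/rank_jobs_app/core/ranking.py | collapse_pairwise_votes_adaptive
-- ===== SOURCE A (Python) =====
-- def majority_vote(votes: list[int]) -> int:
--     positive = sum(1 for vote in votes if vote > 0)
--     negative = sum(1 for vote in votes if vote < 0)
--     if positive > negative:
--         return 1
--     if negative > positive:
--         return -1
--     return 0
--
-- def collapse_pairwise_votes_adaptive(first_two_votes: list[int], third_votes: list[int]) -> list[int]:
--     if len(first_two_votes) % 2 != 0:
--         raise ValueError("first_two_votes length must be divisible by 2")
--     resolved: list[int] = []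
--     third_idx = 0
--     for idx in range(0, len(first_two_votes), 2):
--         vote_a = first_two_votes[idx]
--         vote_b = first_two_votes[idx + 1]
--         if vote_a == vote_b:
--             resolved.append(vote_a)
--             continue
--         if third_idx >= len(third_votes):
--             raise ValueError("not enough third_votes to break ties")
--         resolved.append(majority_vote([vote_a, vote_b, third_votes[third_idx]]))
--         third_idx += 1
--     if third_idx != len(third_votes):
--         raise ValueError("unused third_votes remain after resolving ties")
--     return resolved
-- ===== SOURCE B (Python) =====
-- def _break_tie(a, b, t):
--     s = (a > 0) - (a < 0) + (b > 0) - (b < 0) + (t > 0) - (t < 0)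
--     return 1 if s > 0 else (-1 if s < 0 else 0)
--
--
-- def collapse_pairwise_votes_adaptive(first_two_votes: list[int], third_votes: list[int]) -> list[int]:
--     if len(first_two_votes) % 2 != 0:
--         raise ValueError("first_two_votes length must be divisible by 2")
--     # pass 1: pair up consecutive elements
--     pairs = []
--     pending = None
--     have = False
--     for x in first_two_votes:
--         if have:
--             pairs.append((pending, x))
--             have = False
--         else:
--             pending = x
--             have = True
--     # pass 2: validate counts up front
--     n_ties = sum(1 for a, b in pairs if a != b)
--     if n_ties > len(third_votes):
--         raise ValueError("not enough third_votes to break ties")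
--     if n_ties < len(third_votes):
--         raise ValueError("unused third_votes remain after resolving ties")
--     # pass 3: merge, pulling third votes from an iterator only at ties
--     it = iter(third_votes)
--     return [a if a == b else _break_tie(a, b, next(it)) for a, b in pairs]
-- ===== Notes on version B (the rewrite author's own statement) =====
-- stated objective: alternative
-- what changed: Replaces A's single interleaved index loop with a running third-vote counter by a pair-up pass, an up-front tie-count validation, and a separate merge comprehension driven by an iterator, and replaces the count-positives-vs-negatives majority by a sign-sum tie breaker.
import Mathlib
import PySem

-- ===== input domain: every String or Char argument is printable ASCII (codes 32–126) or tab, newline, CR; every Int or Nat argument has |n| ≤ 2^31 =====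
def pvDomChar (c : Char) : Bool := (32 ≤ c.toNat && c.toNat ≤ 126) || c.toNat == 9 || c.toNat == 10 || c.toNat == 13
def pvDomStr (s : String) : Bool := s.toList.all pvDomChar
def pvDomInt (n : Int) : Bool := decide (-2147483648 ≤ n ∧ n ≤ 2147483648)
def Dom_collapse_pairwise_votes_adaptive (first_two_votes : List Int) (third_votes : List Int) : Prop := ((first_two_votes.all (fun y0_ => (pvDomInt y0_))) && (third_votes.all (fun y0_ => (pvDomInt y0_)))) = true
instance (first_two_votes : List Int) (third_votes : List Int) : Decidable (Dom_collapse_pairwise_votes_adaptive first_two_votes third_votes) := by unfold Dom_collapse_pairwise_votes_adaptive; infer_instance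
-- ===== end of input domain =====

-- B re-decomposes A's interleaved loop into pair-up / validate / merge passes with a
-- sign-sum tie breaker; equivalence is proved on the inputs where A returns (Pre_ below).

-- ===== PORT A =====
def pvMajority (votes : List Int) : Int :=
  let positive : Int := votes.countP (fun v => decide (0 < v))
  let negative : Int := votes.countP (fun v => decide (v < 0))
  if negative < positive then 1
  else if positive < negative then -1
  else 0

-- loop body of A; state = some (resolved, third_idx), none = a ValueError/IndexError was raised
def pvStepA (first_two_votes third_votes : List Int) (st : Option (List Int × Int)) (idx : Int) : Option (List Int × Int) :=
  match st with
  | none => none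
  | some (resolved, third_idx) =>
    match PySem.List.pyGet? first_two_votes idx, PySem.List.pyGet? first_two_votes (idx + 1) with
    | some vote_a, some vote_b =>
      if vote_a = vote_b then some (resolved ++ [vote_a], third_idx)
      else if (third_votes.length : Int) ≤ third_idx then none  -- raise "not enough third_votes to break ties"
      else some (resolved ++ [pvMajority [vote_a, vote_b, PySem.List.pyGetD third_votes third_idx 0]], third_idx + 1)
    | _, _ => none  -- IndexError (unreachable: idx ranges over even indices below the length)

def collapse_pairwise_votes_adaptive (first_two_votes : List Int) (third_votes : List Int) : List Int :=
  if first_two_votes.length % 2 ≠ 0 then []  -- Python raises ValueError; excluded by Pre_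
  else
    match (PySem.List.pyRange 0 first_two_votes.length 2).foldl (pvStepA first_two_votes third_votes) (some ([], 0)) with
    | none => []  -- Python raised inside the loop; excluded by Pre_
    | some (resolved, third_idx) =>
      if third_idx ≠ (third_votes.length : Int) then []  -- raise "unused third_votes"; excluded by Pre_
      else resolved

-- ===== PORT B =====
def pvSign (x : Int) : Int := (if 0 < x then 1 else 0) - (if x < 0 then 1 else 0)

def pvBreakTie (a b t : Int) : Int :=
  let s := pvSign a + pvSign b + pvSign t
  if 0 < s then 1 else if s < 0 then -1 else 0

-- pass 1 of Source B: fold with a 'pending' slot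
def pvPairUp (xs : List Int) : List (Int × Int) × Option Int :=
  xs.foldl (fun st x =>
    match st.2 with
    | some pending => (st.1 ++ [(pending, x)], none)
    | none => (st.1, some x)) ([], none)

def collapse_pairwise_votes_adaptive_alt (first_two_votes : List Int) (third_votes : List Int) : List Int :=
  if first_two_votes.length % 2 ≠ 0 then []  -- raise
  else
    let pairs := (pvPairUp first_two_votes).1
    let nTies := pairs.countP (fun p => decide (p.1 ≠ p.2))
    if third_votes.length < nTies then []      -- raise "not enough third_votes to break ties"
    else if nTies < third_votes.length then [] -- raise "unused third_votes remain after resolving ties"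
    else
      -- pass 3: 'next(it)' = head of the remaining third_votes (never exhausted under the count check)
      (pairs.foldl (fun (st : List Int × List Int) p =>
        if p.1 = p.2 then (st.1 ++ [p.1], st.2)
        else (st.1 ++ [pvBreakTie p.1 p.2 (st.2.headD 0)], st.2.tail)) ([], third_votes)).1

-- ===== PRECONDITION & SPEC =====
-- number of tie pairs among consecutive (even, odd) positions
def pvTieCount : List Int → Nat
  | a :: b :: rest => (if a = b then 0 else 1) + pvTieCount rest
  | _ => 0

-- Pre_ excludes exactly the inputs on which A raises ValueError: an odd-length
-- first_two_votes, or a tie count different from len(third_votes).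
def Pre_collapse_pairwise_votes_adaptive (first_two_votes : List Int) (third_votes : List Int) : Prop :=
  first_two_votes.length % 2 = 0 ∧ pvTieCount first_two_votes = third_votes.length
instance (first_two_votes : List Int) (third_votes : List Int) : Decidable (Pre_collapse_pairwise_votes_adaptive first_two_votes third_votes) := by unfold Pre_collapse_pairwise_votes_adaptive; infer_instance

def pvWitness_collapse_pairwise_votes_adaptive : List Int × List Int := ([1, 1, 1, -1], [1])

def Spec_collapse_pairwise_votes_adaptive (first_two_votes : List Int) (third_votes : List Int) (out : List Int) : Prop := out = collapse_pairwise_votes_adaptive_alt first_two_votes third_votes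
instance (first_two_votes : List Int) (third_votes : List Int) (out : List Int) : Decidable (Spec_collapse_pairwise_votes_adaptive first_two_votes third_votes out) := by unfold Spec_collapse_pairwise_votes_adaptive; infer_instance

-- ===== CLAIM (what is proved, stated in full; the proofs are below) =====
def Claim_equal_collapse_pairwise_votes_adaptive : Prop := ∀ (first_two_votes : List Int) (third_votes : List Int), Dom_collapse_pairwise_votes_adaptive first_two_votes third_votes → Pre_collapse_pairwise_votes_adaptive first_two_votes third_votes → Spec_collapse_pairwise_votes_adaptive first_two_votes third_votes (collapse_pairwise_votes_adaptive first_two_votes third_votes)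

-- ===== LEMMAS AND PROOFS =====

-- structural pairing / merging used only by the proofs
def pvPairsSpec : List Int → List (Int × Int)
  | a :: b :: rest => (a, b) :: pvPairsSpec rest
  | _ => []

def pvMergeSpec : List (Int × Int) → List Int → List Int
  | [], _ => []
  | p :: rest, tv =>
    if p.1 = p.2 then p.1 :: pvMergeSpec rest tv
    else pvBreakTie p.1 p.2 (tv.headD 0) :: pvMergeSpec rest tv.tail

lemma pvRange_two_nil (a b : Int) (h : b ≤ a) : PySem.List.pyRange a b 2 = [] := by
  rw [PySem.List.pyRange_of_pos a b (by norm_num)]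
  rw [if_neg (by omega)]
  simp

lemma pvRange_two_cons (a b : Int) (h : a < b) :
    PySem.List.pyRange a b 2 = a :: PySem.List.pyRange (a + 2) b 2 := by
  rw [PySem.List.pyRange_of_pos a b (by norm_num), PySem.List.pyRange_of_pos (a + 2) b (by norm_num)]
  have h1 : ((b - a + 2 - 1) / 2).toNat
      = (if a + 2 < b then ((b - (a + 2) + 2 - 1) / 2).toNat else 0) + 1 := by
    split_ifs with h2 <;> omega
  rw [if_pos h, h1, List.range_succ_eq_map]
  simp only [List.map_cons, List.map_map, Nat.cast_zero, mul_zero, add_zero]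
  refine congrArg₂ _ rfl (List.map_congr_left fun k _ => ?_)
  simp only [Function.comp]
  push_cast
  ring

lemma pvMajority_eq_breakTie (a b t : Int) : pvMajority [a, b, t] = pvBreakTie a b t := by
  unfold pvMajority pvBreakTie pvSign
  simp only [List.countP_cons, List.countP_nil, decide_eq_true_eq]
  push_cast
  split_ifs <;> omega

lemma pvPairUp_go (xs : List Int) :
    ∀ (acc : List (Int × Int)), xs.length % 2 = 0 →
      xs.foldl (fun st x =>
        match st.2 with
        | some pending => (st.1 ++ [(pending, x)], none)
        | none => (st.1, some x)) (acc, (none : Option Int)) = (acc ++ pvPairsSpec xs, none) := by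
  induction xs using pvPairsSpec.induct with
  | case1 a b rest ih =>
    intro acc h
    simp only [List.length_cons] at h
    simp only [List.foldl_cons]
    rw [ih (acc ++ [(a, b)]) (by omega)]
    simp [pvPairsSpec]
  | case2 xs h1 =>
    intro acc h
    match xs, h1 with
    | [], _ => simp [pvPairsSpec]
    | [x], _ => simp at h
    | a :: b :: r, h1 => exact (h1 a b r rfl).elim

lemma pvPairUp_eq (xs : List Int) (h : xs.length % 2 = 0) :
    pvPairUp xs = (pvPairsSpec xs, none) := by
  unfold pvPairUp
  exact pvPairUp_go xs [] h

lemma pvCountP_pairsSpec (xs : List Int) :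
    (pvPairsSpec xs).countP (fun p => decide (p.1 ≠ p.2)) = pvTieCount xs := by
  induction xs using pvPairsSpec.induct with
  | case1 a b rest ih =>
    simp only [pvPairsSpec, pvTieCount, List.countP_cons, ih]
    by_cases hab : a = b <;> simp [hab]
    omega
  | case2 xs h1 =>
    match xs, h1 with
    | [], _ => simp [pvPairsSpec, pvTieCount]
    | [x], _ => simp [pvPairsSpec, pvTieCount]
    | a :: b :: r, h1 => exact (h1 a b r rfl).elim

lemma pvMergeFold_go (pairs : List (Int × Int)) :
    ∀ (acc tv : List Int),
      (pairs.foldl (fun (st : List Int × List Int) p =>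
        if p.1 = p.2 then (st.1 ++ [p.1], st.2)
        else (st.1 ++ [pvBreakTie p.1 p.2 (st.2.headD 0)], st.2.tail)) (acc, tv)).1
      = acc ++ pvMergeSpec pairs tv := by
  induction pairs with
  | nil => intro acc tv; simp [pvMergeSpec]
  | cons p rest ih =>
    intro acc tv
    simp only [List.foldl_cons, pvMergeSpec]
    by_cases hp : p.1 = p.2
    · rw [if_pos hp, if_pos hp, ih]
      simp
    · rw [if_neg hp, if_neg hp, ih]
      simp

lemma pvLoopA_eq (tv : List Int) (s : List Int) :
    ∀ (pre acc : List Int) (ti : Nat),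
      s.length % 2 = 0 →
      ti + pvTieCount s = tv.length →
      (PySem.List.pyRange (pre.length : Int) ((pre ++ s).length : Int) 2).foldl
          (pvStepA (pre ++ s) tv) (some (acc, (ti : Int)))
        = some (acc ++ pvMergeSpec (pvPairsSpec s) (tv.drop ti), (tv.length : Int)) := by
  induction s using pvPairsSpec.induct with
  | case1 a b rest ih =>
    intro pre acc ti hev hcnt
    simp only [List.length_cons] at hev
    have hlt : (pre.length : Int) < ((pre ++ a :: b :: rest).length : Int) := by
      simp [List.length_append]; omega
    rw [pvRange_two_cons _ _ hlt, List.foldl_cons]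
    have hgetA : PySem.List.pyGet? (pre ++ a :: b :: rest) (pre.length : Int) = some a :=
      PySem.List.pyGet?_append_length pre _ a
    have hgetB : PySem.List.pyGet? (pre ++ a :: b :: rest) ((pre.length : Int) + 1) = some b := by
      have h2 : pre ++ a :: b :: rest = (pre ++ [a]) ++ b :: rest := by simp
      have h3 : (pre.length : Int) + 1 = (((pre ++ [a]).length : Nat) : Int) := by
        simp [List.length_append]
      rw [h2, h3]
      exact PySem.List.pyGet?_append_length (pre ++ [a]) _ b
    by_cases hab : a = b
    · -- tie-free pair
      have hstep : pvStepA (pre ++ a :: b :: rest) tv (some (acc, (ti : Int))) (pre.length : Int)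
          = some (acc ++ [a], (ti : Int)) := by
        simp only [pvStepA, hgetA, hgetB]
        rw [if_pos hab]
      rw [hstep]
      have hpre' : pre ++ a :: b :: rest = (pre ++ [a, b]) ++ rest := by simp
      have hstart : (pre.length : Int) + 2 = (((pre ++ [a, b]).length : Nat) : Int) := by
        simp [List.length_append]
      rw [hpre', hstart]
      rw [ih (pre ++ [a, b]) (acc ++ [a]) ti (by omega)
        (by simpa [pvTieCount, hab] using hcnt)]
      simp only [pvPairsSpec, pvMergeSpec]
      rw [if_pos hab]
      simp [List.append_assoc]
    · -- tie pair: consumes tv[ti]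
      have hti : ti < tv.length := by
        simp only [pvTieCount, if_neg hab] at hcnt; omega
      have hnr : ¬ ((tv.length : Int) ≤ (ti : Int)) := by exact_mod_cast not_le.mpr hti
      have hget3 : PySem.List.pyGetD tv (ti : Int) 0 = tv[ti] := by
        rw [PySem.List.pyGetD_natCast]
        exact List.getD_eq_getElem tv 0 hti
      have hstep : pvStepA (pre ++ a :: b :: rest) tv (some (acc, (ti : Int))) (pre.length : Int)
          = some (acc ++ [pvMajority [a, b, tv[ti]]], (ti : Int) + 1) := by
        simp only [pvStepA, hgetA, hgetB]
        rw [if_neg hab, if_neg hnr, hget3]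
      rw [hstep]
      have hpre' : pre ++ a :: b :: rest = (pre ++ [a, b]) ++ rest := by simp
      have hstart : (pre.length : Int) + 2 = (((pre ++ [a, b]).length : Nat) : Int) := by
        simp [List.length_append]
      have hsucc : (ti : Int) + 1 = ((ti + 1 : Nat) : Int) := by push_cast; ring
      rw [hpre', hstart, hsucc]
      rw [ih (pre ++ [a, b]) (acc ++ [pvMajority [a, b, tv[ti]]]) (ti + 1) (by omega)
        (by simp only [pvTieCount, if_neg hab] at hcnt ⊢; omega)]
      have hdrop : tv.drop ti = tv[ti] :: tv.drop (ti + 1) := List.drop_eq_getElem_cons hti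
      simp only [pvPairsSpec, pvMergeSpec]
      rw [if_neg hab, hdrop]
      simp [List.append_assoc, pvMajority_eq_breakTie, List.getElem?_eq_getElem hti]
  | case2 s h1 =>
    intro pre acc ti hev hcnt
    match s, h1 with
    | [], _ =>
      have hnil : PySem.List.pyRange (pre.length : Int) ((pre ++ ([] : List Int)).length : Int) 2 = [] := by
        apply pvRange_two_nil; simp
      rw [hnil]
      simp only [pvTieCount] at hcnt
      have : ti = tv.length := by omega
      subst this
      simp [pvPairsSpec, pvMergeSpec]
    | [x], _ => simp at hev
    | a :: b :: r, h1 => exact (h1 a b r rfl).elim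

-- ===== VERDICT (by name: the statement is the Claim_ definition above) =====
theorem collapse_pairwise_votes_adaptive_spec : Claim_equal_collapse_pairwise_votes_adaptive := by
  unfold Claim_equal_collapse_pairwise_votes_adaptive
  intro fv tv _ hpre
  obtain ⟨hev, hcnt⟩ := hpre
  unfold Spec_collapse_pairwise_votes_adaptive
  unfold collapse_pairwise_votes_adaptive collapse_pairwise_votes_adaptive_alt
  rw [if_neg (by omega), if_neg (by omega)]
  have hA := pvLoopA_eq tv fv [] [] 0 hev (by omega)
  simp only [List.nil_append, List.length_nil, Nat.cast_zero, List.drop_zero] at hA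
  rw [hA]
  simp only [ne_eq]
  rw [if_neg (by simp)]
  have hP := pvPairUp_eq fv hev
  rw [hP]
  simp only
  rw [pvCountP_pairsSpec]
  rw [if_neg (by omega), if_neg (by omega)]
  rw [pvMergeFold_go]
  simp
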